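-- pv_equiv track=rewrite | github.com/Parth-sk/MIPS-Processor | processor.py | TwosCompUndo
-- ===== SOURCE A (Python) =====
-- def TwosCompUndo(num):
--     num = num[::-1]
--     val = 0
--     l = len(num)
--     for i in range(l-1):
--             val += int(num[i])*(2**int(i))
--
--     if num[l-1]=='1': return val-(2**(l-1))
--     return val
-- ===== SOURCE B (Python) =====
-- def TwosCompUndo(num):
--     # Horner left-to-right: sign bit contributes -2**(l-1) via the -1 seed.
--     val = -1 if num[0] == '1' else 0
--     for c in num[1:]:
--         val = val * 2 + int(c)
--     return val
-- ===== Notes on version B (the rewrite author's own statement) =====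
-- stated objective: idiomatic
-- what changed: Replaces the reverse-and-sum-of-explicit-powers loop with a single left-to-right Horner pass (doubling accumulator seeded -1/0 by the sign bit), no slicing reversal and no 2**i.
import Mathlib
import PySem

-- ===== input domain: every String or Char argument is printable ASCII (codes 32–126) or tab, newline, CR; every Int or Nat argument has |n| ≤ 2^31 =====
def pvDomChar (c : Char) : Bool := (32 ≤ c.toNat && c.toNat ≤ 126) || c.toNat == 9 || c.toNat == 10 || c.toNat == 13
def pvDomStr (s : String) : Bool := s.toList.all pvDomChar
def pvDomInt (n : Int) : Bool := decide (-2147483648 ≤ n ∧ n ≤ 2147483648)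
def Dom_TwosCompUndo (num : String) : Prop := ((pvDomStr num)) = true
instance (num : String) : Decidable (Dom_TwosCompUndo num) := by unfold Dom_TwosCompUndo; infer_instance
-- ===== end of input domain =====

-- B replaces A's reverse-and-sum-of-powers loop by one left-to-right Horner pass (idiomatic; same values).

-- int(c) on a one-character string; the none case (ValueError) is excluded by Pre_
def pvDigit (c : Char) : Int := (PySem.Int.ofChars? [c]).getD 0

-- ===== PORT A =====
def TwosCompUndo (num : String) : Int :=
  let rs := num.toList.reverse                       -- num = num[::-1]
  let l : Int := rs.length
  -- for i in range(l-1): val += int(num[i]) * 2**i   (index always in range here; IndexError excluded by Pre_)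
  let val := (PySem.List.pyRange 0 (l - 1) 1).foldl
      (fun v i => v + pvDigit (PySem.List.pyGetD rs i ' ') * 2 ^ i.toNat) 0
  if PySem.List.pyGetD rs (l - 1) ' ' == '1' then val - 2 ^ (l - 1).toNat else val

-- ===== PORT B =====
def TwosCompUndo_alt (num : String) : Int :=
  let cs := num.toList
  let v0 : Int := if PySem.List.pyGetD cs 0 ' ' == '1' then -1 else 0   -- num[0]; IndexError excluded by Pre_
  (PySem.List.slice cs (some 1) none).foldl (fun v c => v * 2 + pvDigit c) v0   -- for c in num[1:]

-- ===== PRECONDITION & SPEC =====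
-- Pre_: exactly where Python A returns: nonempty (else num[-1] raises IndexError) and every
-- character after the first a decimal digit (else int(c) raises ValueError; the first char is
-- only compared to '1', never passed to int()).
def Pre_TwosCompUndo (num : String) : Prop :=
  num.toList ≠ [] ∧ (num.toList.drop 1).all PySem.Chars.isdigit = true
instance (num : String) : Decidable (Pre_TwosCompUndo num) := by unfold Pre_TwosCompUndo; infer_instance
def pvWitness_TwosCompUndo : String := "1011"

def Spec_TwosCompUndo (num : String) (out : Int) : Prop := out = TwosCompUndo_alt num
instance (num : String) (out : Int) : Decidable (Spec_TwosCompUndo num out) := by unfold Spec_TwosCompUndo; infer_instance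

-- ===== CLAIM (what is proved, stated in full; the proofs are below) =====
def Claim_equal_TwosCompUndo : Prop := ∀ (num : String), Dom_TwosCompUndo num → Pre_TwosCompUndo num → Spec_TwosCompUndo num (TwosCompUndo num)

-- ===== LEMMAS AND PROOFS =====

-- the place-value sum, most significant first
def pvW : List Char → Int
  | [] => 0
  | c :: t => pvDigit c * 2 ^ t.length + pvW t

theorem pvHorner (xs : List Char) (v : Int) :
    xs.foldl (fun v c => v * 2 + pvDigit c) v = v * 2 ^ xs.length + pvW xs := by
  induction xs generalizing v with
  | nil => simp [pvW]
  | cons c t ih =>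
    simp only [List.foldl_cons, ih, pvW, List.length_cons]
    ring

theorem pvAfold (ys : List Char) (rest : List Char) (v : Int) :
    (PySem.List.pyRange 0 (ys.length : Int) 1).foldl
      (fun v i => v + pvDigit (PySem.List.pyGetD (ys ++ rest) i ' ') * 2 ^ i.toNat) v
      = v + pvW ys.reverse := by
  induction ys using List.reverseRecOn generalizing rest v with
  | nil => simp [pvW]
  | append_singleton zs c ih =>
    have hsplit : PySem.List.pyRange 0 ((zs ++ [c]).length : Int) 1
        = PySem.List.pyRange 0 (zs.length : Int) 1 ++ [(zs.length : Int)] := by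
      have : ((zs ++ [c]).length : Int) = (zs.length : Int) + 1 := by simp
      rw [this, PySem.List.pyRange_one_succ_right (by positivity)]
    rw [hsplit, List.foldl_append, List.append_assoc]
    simp only [List.singleton_append]
    rw [ih (c :: rest) v]
    have hget : PySem.List.pyGetD (zs ++ c :: rest) ((zs.length : Int)) ' ' = c := by
      rw [PySem.List.pyGetD_natCast]
      simp [List.getD]
    simp only [List.foldl_cons, List.foldl_nil, hget, Int.toNat_natCast]
    rw [List.reverse_append]
    simp [pvW]
    ring

theorem TwosCompUndo_spec : Claim_equal_TwosCompUndo := by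
  unfold Claim_equal_TwosCompUndo
  intro num _ hpre
  obtain ⟨hne, _⟩ := hpre
  unfold Spec_TwosCompUndo TwosCompUndo TwosCompUndo_alt
  cases hcs : num.toList with
  | nil => exact absurd hcs hne
  | cons c xs =>
    simp only [List.reverse_cons]
    have hlen : (((xs.reverse ++ [c]).length : Int) - 1) = (xs.reverse.length : Int) := by
      simp
    rw [hlen]
    rw [pvAfold xs.reverse [c] 0]
    have hget : PySem.List.pyGetD (xs.reverse ++ [c]) ((xs.reverse.length : Int)) ' ' = c := by
      rw [PySem.List.pyGetD_natCast]
      simp [List.getD]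
    rw [hget, List.reverse_reverse]
    rw [PySem.List.slice_from _ (by norm_num)]
    show _ = (List.drop 1 (c :: xs)).foldl _ _
    rw [List.drop_one, List.tail_cons, pvHorner]
    simp only [PySem.List.pyGetD_zero_cons, Int.toNat_natCast, List.length_reverse]
    by_cases h : c = '1'
    · simp [h]; ring
    · simp [beq_eq_false_iff_ne.mpr h]

-- ===== VERDICT (by name: the statement is the Claim_ definition above) =====
-- (theorem above doubles as verdict)
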